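-- pv_equiv track=rewrite | github.com/vercah/string-attractors | attractor_module.py | crosses_attractor
-- ===== SOURCE A (Python) =====
-- def crosses_attractor(factor: list, word: list, attr: list) -> int:
--     for at in attr:
--         if at not in range(len(word)):
--             continue
--         for i in range(max(0, at-len(word)+len(factor)), min(len(factor)-1, at)+1):
--             is_in = True
--             for j in range(0, len(factor)):
--                 if factor[j] != word[at-i+j]:
--                     is_in = False
--                     break
--             if is_in:
--                 return at
--     return None
-- ===== SOURCE B (Python) =====
-- def crosses_attractor(factor: list, word: list, attr: list) -> int:
--     # Precompute which word positions are covered by some occurrence of factor,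
--     # then scan the attractor once (removes the per-attractor re-search of A).
--     n, m = len(word), len(factor)
--     covered = [False] * n
--     if 0 < m <= n:
--         for s in range(n - m + 1):
--             if word[s:s + m] == factor:
--                 for p in range(s, s + m):
--                     covered[p] = True
--     for at in attr:
--         if 0 <= at < n and covered[at]:
--             return at
--     return None
-- ===== Notes on version B (the rewrite author's own statement) =====
-- stated objective: faster
-- what changed: B precomputes in one scan of the word the set of positions covered by any occurrence of factor (boolean array), then checks each attractor position with an O(1) lookup, instead of A's per-attractor nested search over alignments and characters.
import Mathlib
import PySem

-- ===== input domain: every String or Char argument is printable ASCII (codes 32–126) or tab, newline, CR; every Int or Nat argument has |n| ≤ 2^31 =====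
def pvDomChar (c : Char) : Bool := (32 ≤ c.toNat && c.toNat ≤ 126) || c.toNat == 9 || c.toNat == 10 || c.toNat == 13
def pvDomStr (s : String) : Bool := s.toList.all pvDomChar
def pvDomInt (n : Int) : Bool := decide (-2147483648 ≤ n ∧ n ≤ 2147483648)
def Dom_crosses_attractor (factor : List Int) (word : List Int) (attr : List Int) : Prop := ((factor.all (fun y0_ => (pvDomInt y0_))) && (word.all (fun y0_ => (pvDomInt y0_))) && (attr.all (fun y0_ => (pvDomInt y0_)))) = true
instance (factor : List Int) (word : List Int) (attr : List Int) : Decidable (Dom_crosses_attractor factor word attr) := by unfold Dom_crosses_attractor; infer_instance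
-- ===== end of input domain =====

-- B precomputes, in one scan of the word, which positions are covered by an occurrence of
-- factor, then checks each attractor with an O(1) lookup (objective: faster).

-- ===== PORT A =====
-- inner `for j` loop of A: compare factor against word at alignment at-i, break on mismatch
def caMatch (factor : List Int) (word : List Int) (a : Int) (i : Int) : Bool :=
  (PySem.List.pyRange 0 (factor.length : Int) 1).all
    (fun j => PySem.List.pyGet? factor j == PySem.List.pyGet? word (a - i + j))

def crosses_attractor (factor : List Int) (word : List Int) (attr : List Int) : Option Int :=
  attr.findSome? (fun a =>
    if ¬ (0 ≤ a ∧ a < (word.length : Int)) then none   -- `if at not in range(len(word)): continue`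
    else if (PySem.List.pyRange (max 0 (a - (word.length : Int) + (factor.length : Int)))
               (min ((factor.length : Int) - 1) a + 1) 1).any (caMatch factor word a)
    then some a else none)

-- ===== PORT B =====
-- `for p in range(s, s+m): covered[p] = True` (every index reached is in range, so set is exact)
def cbMark (c : List Bool) (a : Int) (b : Int) : List Bool :=
  (PySem.List.pyRange a b 1).foldl (fun c p => c.set p.toNat true) c

-- builds the `covered` array of Source B
def cbCovered (factor : List Int) (word : List Int) : List Bool :=
  if 0 < (factor.length : Int) ∧ (factor.length : Int) ≤ (word.length : Int) then
    (PySem.List.pyRange 0 ((word.length : Int) - (factor.length : Int) + 1) 1).foldl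
      (fun c s =>
        if PySem.List.slice word (some s) (some (s + (factor.length : Int))) = factor
        then cbMark c s (s + (factor.length : Int)) else c)
      (List.replicate word.length false)
  else List.replicate word.length false

def crosses_attractor_alt (factor : List Int) (word : List Int) (attr : List Int) : Option Int :=
  let covered := cbCovered factor word
  attr.findSome? (fun a =>
    if 0 ≤ a ∧ a < (word.length : Int) ∧ covered.getD a.toNat false = true
    then some a else none)

-- ===== PRECONDITION & SPEC =====
def Spec_crosses_attractor (factor : List Int) (word : List Int) (attr : List Int) (out : Option Int) : Prop := out = crosses_attractor_alt factor word attr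
instance (factor : List Int) (word : List Int) (attr : List Int) (out : Option Int) : Decidable (Spec_crosses_attractor factor word attr out) := by unfold Spec_crosses_attractor; infer_instance

-- ===== CLAIM (what is proved, stated in full; the proofs are below) =====
def Claim_equal_crosses_attractor : Prop := ∀ (factor : List Int) (word : List Int) (attr : List Int), Dom_crosses_attractor factor word attr → Spec_crosses_attractor factor word attr (crosses_attractor factor word attr)

-- ===== LEMMAS AND PROOFS =====

-- position k (an Int) is covered by some occurrence of factor in word
def PCov (factor : List Int) (word : List Int) (k : Int) : Prop :=
  ∃ s : Int, 0 ≤ s ∧ s + (factor.length : Int) ≤ (word.length : Int) ∧ s ≤ k ∧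
    k < s + (factor.length : Int) ∧
    PySem.List.slice word (some s) (some (s + (factor.length : Int))) = factor

lemma cbMark_length (c : List Bool) (a b : Int) : (cbMark c a b).length = c.length := by
  unfold cbMark
  generalize PySem.List.pyRange a b 1 = l
  induction l generalizing c with
  | nil => rfl
  | cons x xs ih => rw [List.foldl_cons, ih, List.length_set]

lemma cbMark_getD (c : List Bool) (a b : Int) (ha : 0 ≤ a) (hb : b ≤ (c.length : Int)) (k : Nat) :
    (cbMark c a b).getD k false
      = (c.getD k false || decide (a ≤ (k : Int) ∧ (k : Int) < b)) := by
  unfold cbMark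
  induction hN : (b - a).toNat generalizing a c with
  | zero =>
    rw [PySem.List.pyRange_one_eq_nil (by omega)]
    have : ¬ (a ≤ (k : Int) ∧ (k : Int) < b) := by omega
    simp [this]
  | succ t ih =>
    rw [PySem.List.pyRange_one_cons (by omega), List.foldl_cons]
    have hlen : ((c.set a.toNat true).length : Int) = (c.length : Int) := by
      rw [List.length_set]
    have := ih (c.set a.toNat true) (a + 1) (by omega) (by omega) (by omega)
    rw [this]
    by_cases hk : k = a.toNat
    · have hlt : a.toNat < c.length := by omega
      have h1 : a ≤ (k : Int) ∧ (k : Int) < b := by omega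
      simp [h1.1, h1.2]
      exact Or.inl (by rw [hk]; simp [hlt])
    · have h2 : (c.set a.toNat true).getD k false = c.getD k false := by
        simp [List.getD, List.getElem?_set_ne (by omega : a.toNat ≠ k)]
      have h3 : (a + 1 ≤ (k : Int) ∧ (k : Int) < b) ↔ (a ≤ (k : Int) ∧ (k : Int) < b) := by omega
      rw [h2, decide_eq_decide.mpr h3]

lemma caMatch_iff (factor word : List Int) (a i : Int)
    (h1 : 0 ≤ a - i) (h2 : a - i + (factor.length : Int) ≤ (word.length : Int)) :
    caMatch factor word a i = true ↔
      PySem.List.slice word (some (a - i)) (some (a - i + (factor.length : Int))) = factor := by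
  unfold caMatch
  rw [List.all_eq_true, PySem.List.slice_toNat word (by omega) (by omega)]
  have hm : ((a - i) + (factor.length : Int)).toNat - (a - i).toNat = factor.length := by omega
  rw [hm]
  have hlen : ((word.drop (a - i).toNat).take factor.length).length = factor.length := by
    rw [List.length_take, List.length_drop]; omega
  have hkey : ∀ (j : Nat) (hj : j < factor.length),
      ((PySem.List.pyGet? factor (j : Int) == PySem.List.pyGet? word (a - i + (j : Int))) = true
        ↔ factor[j]'hj = word[(a - i).toNat + j]'(by omega)) := by
    intro j hj
    have e1 : PySem.List.pyGet? factor (j : Int) = some (factor[j]'hj) := by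
      rw [PySem.List.pyGet?_natCast, List.getElem?_eq_getElem hj]
    have e2 : PySem.List.pyGet? word (a - i + (j : Int))
        = some (word[(a - i).toNat + j]'(by omega)) := by
      rw [(by omega : a - i + (j : Int) = (((a - i).toNat + j : Nat) : Int)),
          PySem.List.pyGet?_natCast, List.getElem?_eq_getElem (by omega)]
    rw [e1, e2]
    simp
  constructor
  · intro h
    apply List.ext_getElem hlen
    intro j hj1 hj2
    have hj : j < factor.length := hj2
    have hmem : ((j : Int)) ∈ PySem.List.pyRange 0 (factor.length : Int) 1 := by
      rw [PySem.List.mem_pyRange_one]; omega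
    rw [List.getElem_take, List.getElem_drop]
    exact ((hkey j hj).mp (h _ hmem)).symm
  · intro heq j hjmem
    rw [PySem.List.mem_pyRange_one] at hjmem
    have hj : j.toNat < factor.length := by omega
    have hjc : ((j.toNat : Int)) = j := by omega
    rw [← hjc]
    rw [hkey j.toNat hj]
    have hg := List.getElem_of_eq heq.symm hj
    rw [List.getElem_take, List.getElem_drop] at hg
    exact hg

lemma covA_iff (factor word : List Int) (a : Int) :
    ((PySem.List.pyRange (max 0 (a - (word.length : Int) + (factor.length : Int)))
        (min ((factor.length : Int) - 1) a + 1) 1).any (caMatch factor word a) = true)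
      ↔ PCov factor word a := by
  rw [List.any_eq_true]
  constructor
  · rintro ⟨i, hmem, hi⟩
    rw [PySem.List.mem_pyRange_one] at hmem
    have hb1 : 0 ≤ a - i := by omega
    have hb2 : a - i + (factor.length : Int) ≤ (word.length : Int) := by omega
    exact ⟨a - i, hb1, hb2, by omega, by omega, (caMatch_iff factor word a i hb1 hb2).mp hi⟩
  · rintro ⟨s, hs0, hsm, hsk, hks, hslice⟩
    refine ⟨a - s, ?_, ?_⟩
    · rw [PySem.List.mem_pyRange_one]; omega
    · refine (caMatch_iff factor word a (a - s) (by omega) (by omega)).mpr ?_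
      have hss : a - (a - s) = s := by omega
      rw [hss]; exact hslice

-- invariant of B's scanning loop: a position is set in `covered` iff it was already set
-- or some occurrence of factor starting in the remaining range [lo, n-m+1) covers it
lemma cbFold_getD (factor word : List Int) (k : Nat) (lo : Int) (c : List Bool)
    (hlo : 0 ≤ lo) (hc : c.length = word.length) :
    (((PySem.List.pyRange lo ((word.length : Int) - (factor.length : Int) + 1) 1).foldl
        (fun c s =>
          if PySem.List.slice word (some s) (some (s + (factor.length : Int))) = factor
          then cbMark c s (s + (factor.length : Int)) else c) c).getD k false = true
      ↔ (c.getD k false = true ∨ ∃ s : Int,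
            lo ≤ s ∧ s < (word.length : Int) - (factor.length : Int) + 1 ∧
            PySem.List.slice word (some s) (some (s + (factor.length : Int))) = factor ∧
            s ≤ (k : Int) ∧ (k : Int) < s + (factor.length : Int))) := by
  induction hN : ((word.length : Int) - (factor.length : Int) + 1 - lo).toNat generalizing lo c with
  | zero =>
    rw [PySem.List.pyRange_one_eq_nil (by omega), List.foldl_nil]
    constructor
    · exact Or.inl
    · rintro (h | ⟨s, h1, h2, _⟩)
      · exact h
      · omega
  | succ t ih =>
    rw [PySem.List.pyRange_one_cons (by omega), List.foldl_cons]
    by_cases hsl : PySem.List.slice word (some lo) (some (lo + (factor.length : Int))) = factor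
    · rw [if_pos hsl,
          ih (lo + 1) (cbMark c lo (lo + (factor.length : Int))) (by omega)
            (by rw [cbMark_length, hc]) (by omega),
          cbMark_getD c lo (lo + (factor.length : Int)) hlo (by omega) k]
      simp only [Bool.or_eq_true, decide_eq_true_eq]
      constructor
      · rintro ((h | h) | ⟨s, h1, h2, h3, h4, h5⟩)
        · exact Or.inl h
        · exact Or.inr ⟨lo, le_refl lo, by omega, hsl, by omega, by omega⟩
        · exact Or.inr ⟨s, by omega, h2, h3, h4, h5⟩
      · rintro (h | ⟨s, h1, h2, h3, h4, h5⟩)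
        · exact Or.inl (Or.inl h)
        · by_cases hseq : s = lo
          · subst hseq; exact Or.inl (Or.inr ⟨h4, h5⟩)
          · exact Or.inr ⟨s, by omega, h2, h3, h4, h5⟩
    · rw [if_neg hsl, ih (lo + 1) c (by omega) hc (by omega)]
      constructor
      · rintro (h | ⟨s, h1, h2, h3, h4, h5⟩)
        · exact Or.inl h
        · exact Or.inr ⟨s, by omega, h2, h3, h4, h5⟩
      · rintro (h | ⟨s, h1, h2, h3, h4, h5⟩)
        · exact Or.inl h
        · by_cases hseq : s = lo
          · subst hseq; exact absurd h3 hsl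
          · exact Or.inr ⟨s, by omega, h2, h3, h4, h5⟩

lemma covB_iff (factor word : List Int) (k : Nat) :
    ((cbCovered factor word).getD k false = true) ↔ PCov factor word (k : Int) := by
  unfold cbCovered
  have hrep : (List.replicate word.length false).getD k false = false := by
    simp [List.getD, List.getElem?_replicate]
    split <;> rfl
  by_cases hmn : 0 < (factor.length : Int) ∧ (factor.length : Int) ≤ (word.length : Int)
  · rw [if_pos hmn,
        cbFold_getD factor word k 0 (List.replicate word.length false) le_rfl
          (List.length_replicate), hrep]
    unfold PCov
    constructor
    · rintro (h | ⟨s, h1, h2, h3, h4, h5⟩)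
      · exact absurd h (by simp)
      · exact ⟨s, by omega, by omega, h4, h5, h3⟩
    · rintro ⟨s, h1, h2, h3, h4, h5⟩
      exact Or.inr ⟨s, by omega, by omega, h5, h3, h4⟩
  · rw [if_neg hmn, hrep]
    unfold PCov
    constructor
    · intro h; exact absurd h (by simp)
    · rintro ⟨s, h1, h2, h3, h4, h5⟩
      exfalso; omega

-- ===== VERDICT (by name: the statement is the Claim_ definition above) =====
theorem crosses_attractor_spec : Claim_equal_crosses_attractor := by
  intro factor word attr _
  unfold Spec_crosses_attractor crosses_attractor crosses_attractor_alt
  have hfun : ∀ a : Int,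
      (if ¬ (0 ≤ a ∧ a < (word.length : Int)) then (none : Option Int)
       else if (PySem.List.pyRange (max 0 (a - (word.length : Int) + (factor.length : Int)))
                  (min ((factor.length : Int) - 1) a + 1) 1).any (caMatch factor word a)
       then some a else none)
    = (if 0 ≤ a ∧ a < (word.length : Int) ∧ (cbCovered factor word).getD a.toNat false = true
       then some a else none) := by
    intro a
    by_cases h : 0 ≤ a ∧ a < (word.length : Int)
    · rw [if_neg (not_not_intro h)]
      have hk : ((a.toNat : Int)) = a := Int.toNat_of_nonneg h.1
      have hcb : ((cbCovered factor word).getD a.toNat false = true) ↔ PCov factor word a := by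
        rw [covB_iff, hk]
      by_cases hc : PCov factor word a
      · rw [if_pos ((covA_iff factor word a).mpr hc), if_pos ⟨h.1, h.2, hcb.mpr hc⟩]
      · rw [if_neg (fun hh => hc ((covA_iff factor word a).mp hh)),
            if_neg (fun hh => hc (hcb.mp hh.2.2))]
    · rw [if_pos h, if_neg (fun hh => h ⟨hh.1, hh.2.1⟩)]
  exact congrArg (fun f => List.findSome? f attr) (funext hfun)
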